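-- pv_equiv track=rewrite | github.com/lightbits/euler | problem267.py | result
-- ===== SOURCE A (Python) =====
-- def result(f, n, m):
-- 	incr = 1 + f * 2
-- 	decr = 1 - f
-- 	for x in range(0, n + 1):
-- 		money = pow(incr, x) * pow(decr, n - x)
-- 		if money >= m:
-- 			return x
-- 	return n + 1
-- ===== SOURCE B (Python) =====
-- def result(f, n, m):
--     incr = 1 + 2 * f
--     decr = 1 - f
--     if n < 0:
--         return n + 1
--     pi = 1            # pi = incr ** x, maintained incrementally
--     pd = decr ** n    # pd = decr ** (n - x), maintained incrementally
--     for x in range(n + 1):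
--         if pi * pd >= m:
--             return x
--         pi *= incr
--         if decr != 0:
--             pd //= decr        # exact: pd is a power of decr
--         elif x + 1 == n:
--             pd = 1             # 0 ** 0
--         else:
--             pd = 0
--     return n + 1
-- ===== Notes on version B (the rewrite author's own statement) =====
-- stated objective: alternative
-- what changed: Replaces the two bigint pow() calls recomputed from scratch at every candidate x by running powers updated incrementally (one initial pow, then one multiplication and one exact floor division per step), keeping the early exit.
import Mathlib
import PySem

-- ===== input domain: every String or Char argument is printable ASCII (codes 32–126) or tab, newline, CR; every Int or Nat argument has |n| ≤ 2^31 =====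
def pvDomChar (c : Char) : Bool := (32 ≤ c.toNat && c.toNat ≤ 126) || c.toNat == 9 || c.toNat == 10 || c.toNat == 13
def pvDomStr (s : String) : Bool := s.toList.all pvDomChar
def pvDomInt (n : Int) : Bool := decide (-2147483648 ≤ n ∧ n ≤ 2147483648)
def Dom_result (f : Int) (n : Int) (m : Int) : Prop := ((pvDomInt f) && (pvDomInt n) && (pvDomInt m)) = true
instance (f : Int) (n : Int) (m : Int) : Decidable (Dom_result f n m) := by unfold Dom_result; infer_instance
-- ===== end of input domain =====

-- B replaces the two bigint pow() calls recomputed at every candidate x by running powers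
-- updated incrementally (one multiplication and one exact division per step), keeping A's
-- early exit: an alternative computation scheme with the same return value everywhere.


-- ===== PORT A =====
-- A's for-loop over range(0, n+1); pow is exact here: every exponent the loop
-- reaches (x and n-x for 0 ≤ x ≤ n) is nonnegative, so Int pow with .toNat matches Python pow.
def resultLoopA (incr decr n m : Int) : List Int → Int
  | [] => n + 1
  | x :: xs =>
      if incr ^ x.toNat * decr ^ (n - x).toNat ≥ m then x
      else resultLoopA incr decr n m xs

def result (f : Int) (n : Int) (m : Int) : Int :=
  let incr := 1 + f * 2
  let decr := 1 - f
  resultLoopA incr decr n m (PySem.List.pyRange 0 (n + 1) 1)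

-- ===== PORT B =====
-- Source B's loop: running pi = incr**x and pd = decr**(n-x), updated in place each step
def altLoopB (incr decr m n : Int) (pi pd : Int) : List Int → Int
  | [] => n + 1
  | x :: xs =>
      if pi * pd ≥ m then x
      else altLoopB incr decr m n (pi * incr)
        (if decr ≠ 0 then PySem.Int.floordiv pd decr
         else if x + 1 = n then 1 else 0) xs

def result_alt (f : Int) (n : Int) (m : Int) : Int :=
  let incr := 1 + 2 * f
  let decr := 1 - f
  if n < 0 then n + 1
  -- decr ** n with n ≥ 0: exponent nonnegative, so Int pow with .toNat matches Python **
  else altLoopB incr decr m n 1 (decr ^ n.toNat) (PySem.List.pyRange 0 (n + 1) 1)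

-- ===== PRECONDITION & SPEC =====
def Spec_result (f : Int) (n : Int) (m : Int) (out : Int) : Prop := out = result_alt f n m
instance (f : Int) (n : Int) (m : Int) (out : Int) : Decidable (Spec_result f n m out) := by unfold Spec_result; infer_instance

-- ===== CLAIM (what is proved, stated in full; the proofs are below) =====
def Claim_equal_result : Prop := ∀ (f : Int) (n : Int) (m : Int), Dom_result f n m → Spec_result f n m (result f n m)

-- ===== LEMMAS AND PROOFS =====

lemma fd_pow (decr : Int) (hd : decr ≠ 0) (s : Nat) :
    PySem.Int.floordiv (decr ^ (s + 1)) decr = decr ^ s := by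
  have hmod : PySem.Int.mod (decr ^ (s + 1)) decr = 0 :=
    (PySem.Int.mod_eq_zero_iff_dvd _ _).2 (dvd_pow_self decr (Nat.succ_ne_zero s))
  have h := PySem.Int.floordiv_mul_add_mod (decr ^ (s + 1)) decr
  rw [hmod, add_zero] at h
  have h2 : PySem.Int.floordiv (decr ^ (s + 1)) decr * decr = decr ^ s * decr := by
    rw [h, pow_succ]
  exact mul_right_cancel₀ hd h2

lemma loops_eq (incr decr m : Int) (k : Nat) :
    ∀ (j x : Nat), x + j = k + 1 →
      resultLoopA incr decr (k : Int) m ((List.range' x j).map (fun i => Int.ofNat i))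
        = altLoopB incr decr m (k : Int) (incr ^ x) (decr ^ (k - x))
            ((List.range' x j).map (fun i => Int.ofNat i)) := by
  intro j
  induction j with
  | zero => intro x _; simp [resultLoopA, altLoopB]
  | succ j ih =>
      intro x hxj
      have hxk : x ≤ k := by omega
      rw [List.range'_succ, List.map_cons]
      simp only [resultLoopA, altLoopB]
      have h1 : (Int.ofNat x).toNat = x := rfl
      have h2 : ((k : Int) - Int.ofNat x).toNat = k - x := by
        simp only [Int.ofNat_eq_natCast]; omega
      rw [h1, h2]
      split
      · rfl
      · cases j with
        | zero => simp [resultLoopA, altLoopB]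
        | succ j' =>
            have hxk' : x + 1 ≤ k := by omega
            have hpd : (if decr ≠ 0 then PySem.Int.floordiv (decr ^ (k - x)) decr
                        else if Int.ofNat x + 1 = (k : Int) then 1 else 0)
                = decr ^ (k - (x + 1)) := by
              by_cases hd : decr = 0
              · subst hd
                rw [if_neg (by simp)]
                by_cases hx1 : x + 1 = k
                · rw [if_pos (by simp only [Int.ofNat_eq_natCast]; omega)]
                  have : k - (x + 1) = 0 := by omega
                  rw [this, pow_zero]
                · rw [if_neg (by simp only [Int.ofNat_eq_natCast]; omega)]
                  rw [zero_pow (by omega)]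
              · rw [if_pos hd]
                have hs : k - x = (k - (x + 1)) + 1 := by omega
                rw [hs]
                exact fd_pow decr hd _
            rw [hpd, ← pow_succ]
            exact ih (x + 1) (by omega)

-- ===== VERDICT (by name: the statement is the Claim_ definition above) =====
theorem result_spec : Claim_equal_result := by
  intro f n m _
  unfold Spec_result result result_alt
  by_cases hn : n < 0
  · rw [PySem.List.pyRange_one_eq_nil (by omega)]
    simp [resultLoopA, hn]
  · rw [if_neg hn]
    obtain ⟨k, hk⟩ : ∃ k : Nat, n = (k : Int) := ⟨n.toNat, by omega⟩
    subst hk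
    rw [Int.toNat_natCast, PySem.List.pyRange_one]
    have hlen : ((k : Int) + 1 - 0).toNat = k + 1 := by omega
    rw [hlen]
    have hmap : (List.range (k + 1)).map (fun j : Nat => (0 : Int) + (j : Int))
        = (List.range' 0 (k + 1)).map (fun i => Int.ofNat i) := by
      rw [← List.range_eq_range']
      exact List.map_congr_left (fun a _ => by simp [Int.ofNat_eq_natCast])
    rw [hmap]
    have harith : 1 + 2 * f = 1 + f * 2 := by ring
    rw [harith]
    have H := loops_eq (1 + f * 2) (1 - f) m k (k + 1) 0 (by omega)
    rw [pow_zero, Nat.sub_zero] at H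
    exact H
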